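-- pv_equiv track=rewrite | github.com/Algorithm-Study-AS/Algorithm-study | 김창성/그래프 탐색/봄버맨-16918.py | bombed_
-- ===== SOURCE A (Python) =====
-- def bombed_(location,R,C):
--     bombed=[['O' for _ in range(C)] for _ in range(R)]
--     for i in range(R):
--         for j in range(C):
--             if location[i][j]=='O': #폭탄 설치되어 있으면 주변 터뜨림
--                 bombed[i][j]='.'
--                 for dx, dy in (0, 1), (0, -1), (1, 0), (-1, 0):
--                     x, y = i+dx, j+dy
--                     if 0<=x<R and 0<=y<C:
--                         bombed[x][y]='.'
--     return bombed
-- ===== SOURCE B (Python) =====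
-- def bombed_(location, R, C):
--     # Gather: each output cell is decided once by looking at itself and its
--     # in-range 4-neighbours in location; no intermediate all-'O' grid, no scatter.
--     def boom(i, j):
--         if location[i][j] == 'O':
--             return True
--         for di, dj in ((0, 1), (0, -1), (1, 0), (-1, 0)):
--             x, y = i + di, j + dj
--             if 0 <= x < R and 0 <= y < C and location[x][y] == 'O':
--                 return True
--         return False
--     return [['.' if boom(i, j) else 'O' for j in range(C)] for i in range(R)]
-- ===== Notes on version B (the rewrite author's own statement) =====
-- stated objective: alternative
-- what changed: B builds the output grid by a gather/pull strategy - each cell is computed once as '.' iff it or an in-range 4-neighbour of it holds 'O' - instead of A's scatter that initialises an all-'O' grid and writes '.' outward from every bomb.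
import Mathlib
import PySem

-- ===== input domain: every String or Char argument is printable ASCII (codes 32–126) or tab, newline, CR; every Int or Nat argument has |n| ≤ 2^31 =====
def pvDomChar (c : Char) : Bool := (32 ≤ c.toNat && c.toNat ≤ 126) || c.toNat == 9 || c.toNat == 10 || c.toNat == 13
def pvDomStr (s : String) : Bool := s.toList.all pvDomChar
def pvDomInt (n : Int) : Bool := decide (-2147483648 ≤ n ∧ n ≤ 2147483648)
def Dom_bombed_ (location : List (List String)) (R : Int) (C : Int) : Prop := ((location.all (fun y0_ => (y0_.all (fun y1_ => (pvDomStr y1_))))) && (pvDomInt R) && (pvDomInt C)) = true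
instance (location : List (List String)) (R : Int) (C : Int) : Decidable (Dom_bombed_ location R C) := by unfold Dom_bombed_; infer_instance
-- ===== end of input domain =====

-- B replaces A's scatter (initialise an all-'O' grid, write '.' outward from every bomb) by a
-- gather: each output cell is decided once from location itself and its in-range 4-neighbours.

-- ===== PORT A =====
-- location[i][j]; Python raises exactly where the defaults would fire, which Pre_ excludes
def pvCell (location : List (List String)) (i j : Int) : String :=
  PySem.List.pyGetD (PySem.List.pyGetD location i []) j ""

def pvDirs : List (Int × Int) := [(0, 1), (0, -1), (1, 0), (-1, 0)]

-- bombed[x][y] = v; exact for the guarded uses below (0 ≤ x < R ≤ rows, 0 ≤ y < C ≤ row length)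
def pvSet2 (g : List (List String)) (x y : Int) (v : String) : List (List String) :=
  g.modify x.toNat (fun row => row.set y.toNat v)

-- body of A's two nested loops for one (i, j)
def pvMark (location : List (List String)) (R C : Int) (g : List (List String)) (i j : Int) :
    List (List String) :=
  if pvCell location i j = "O" then
    pvDirs.foldl (fun g d =>
      if 0 ≤ i + d.1 ∧ i + d.1 < R ∧ 0 ≤ j + d.2 ∧ j + d.2 < C then
        pvSet2 g (i + d.1) (j + d.2) "."
      else g) (pvSet2 g i j ".")
  else g

def bombed_ (location : List (List String)) (R : Int) (C : Int) : List (List String) :=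
  (PySem.List.pyRange 0 R 1).foldl
    (fun g i => (PySem.List.pyRange 0 C 1).foldl (fun g j => pvMark location R C g i j) g)
    ((PySem.List.pyRange 0 R 1).map fun _ => (PySem.List.pyRange 0 C 1).map fun _ => "O")

-- ===== PORT B =====
-- boom(i, j): the cell itself or an in-range 4-neighbour holds 'O' (loop with early return = any)
def pvBoom (location : List (List String)) (R C i j : Int) : Bool :=
  if pvCell location i j = "O" then true
  else pvDirs.any (fun d =>
    decide (0 ≤ i + d.1) && decide (i + d.1 < R) && decide (0 ≤ j + d.2) && decide (j + d.2 < C) &&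
    decide (pvCell location (i + d.1) (j + d.2) = "O"))

def bombed__alt (location : List (List String)) (R : Int) (C : Int) : List (List String) :=
  (PySem.List.pyRange 0 R 1).map fun i =>
    (PySem.List.pyRange 0 C 1).map fun j =>
      if pvBoom location R C i j then "." else "O"

-- ===== PRECONDITION & SPEC =====
-- Pre_ excludes exactly the inputs where Python A raises IndexError: when both loops run
-- (0 < R and 0 < C), location must have at least R rows and each of its first R rows at
-- least C entries.
def Pre_bombed_ (location : List (List String)) (R : Int) (C : Int) : Prop :=
  0 < R → 0 < C →
    R ≤ (location.length : Int) ∧ ∀ row ∈ location.take R.toNat, C ≤ (row.length : Int)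
instance (location : List (List String)) (R : Int) (C : Int) : Decidable (Pre_bombed_ location R C) := by
  unfold Pre_bombed_; infer_instance

def pvWitness_bombed_ : List (List String) × Int × Int := ([["O", "."], [".", "."]], 2, 2)

def Spec_bombed_ (location : List (List String)) (R : Int) (C : Int) (out : List (List String)) : Prop := out = bombed__alt location R C
instance (location : List (List String)) (R : Int) (C : Int) (out : List (List String)) : Decidable (Spec_bombed_ location R C out) := by unfold Spec_bombed_; infer_instance

-- ===== CLAIM (what is proved, stated in full; the proofs are below) =====
def Claim_equal_bombed_ : Prop := ∀ (location : List (List String)) (R : Int) (C : Int), Dom_bombed_ location R C → Pre_bombed_ location R C → Spec_bombed_ location R C (bombed_ location R C)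

-- ===== LEMMAS AND PROOFS =====

-- grid shape: Rn rows, each of length Cn
def pvShape (g : List (List String)) (Rn Cn : Nat) : Prop :=
  g.length = Rn ∧ ∀ k (h : k < g.length), g[k].length = Cn

-- cell read used by the proofs
def pvGG (g : List (List String)) (x y : Nat) : String := (g.getD x []).getD y ""

-- "(x, y) is (i, j) shifted by some direction of ds"
def pvNear (i j : Int) (x y : Nat) (ds : List (Int × Int)) : Bool :=
  ds.any fun d => decide ((x : Int) = i + d.1) && decide ((y : Int) = j + d.2)

-- "a bomb at (i, j) blackens (x, y)"
def pvAdjB (i j : Int) (x y : Nat) : Bool :=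
  (decide ((x : Int) = i) && decide ((y : Int) = j)) || pvNear i j x y pvDirs

def pvMarkHit (location : List (List String)) (i j : Int) (x y : Nat) : Bool :=
  decide (pvCell location i j = "O") && pvAdjB i j x y

-- "some bomb of the grid blackens (x, y)"
def pvHitB (location : List (List String)) (R C : Int) (x y : Nat) : Bool :=
  (PySem.List.pyRange 0 R 1).any fun i =>
    (PySem.List.pyRange 0 C 1).any fun j => pvMarkHit location i j x y

theorem pvFoldlId {α β : Type} (l : List α) (z : β) : l.foldl (fun g _ => g) z = z := by
  induction l generalizing z with
  | nil => rfl
  | cons a t ih => exact ih z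

theorem pvShape_set2 {g : List (List String)} {Rn Cn : Nat} (h : pvShape g Rn Cn)
    (x y : Int) (v : String) : pvShape (pvSet2 g x y v) Rn Cn := by
  obtain ⟨h1, h2⟩ := h
  refine ⟨by simpa [pvSet2] using h1, ?_⟩
  intro k hk
  simp only [pvSet2, List.length_modify] at hk
  simp only [pvSet2]
  rw [List.getElem_modify]
  split
  · simpa using h2 k hk
  · exact h2 k hk

theorem pvGG_set2 {g : List (List String)} {Rn Cn : Nat} (h : pvShape g Rn Cn) {p q : Int}
    {x y : Nat} (hp : 0 ≤ p) (hq : 0 ≤ q) (hx : x < Rn) (hy : y < Cn) (v : String) :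
    pvGG (pvSet2 g p q v) x y
    = if (x : Int) = p ∧ (y : Int) = q then v else pvGG g x y := by
  obtain ⟨h1, h2⟩ := h
  have hxg : x < g.length := by omega
  have hrow : (g[x]'hxg).length = Cn := h2 x hxg
  have hlen : x < (pvSet2 g p q v).length := by simpa [pvSet2] using hxg
  have hAg : pvGG g x y = (g[x]'hxg).getD y "" := by rw [pvGG, List.getD_eq_getElem _ _ hxg]
  have hgEl : (pvSet2 g p q v)[x]'hlen
      = if p.toNat = x then (g[x]'hxg).set q.toNat v else g[x]'hxg := by
    simp only [pvSet2]
    rw [List.getElem_modify]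
  rw [pvGG, List.getD_eq_getElem _ _ hlen, hgEl]
  by_cases hpx : p.toNat = x
  · rw [if_pos hpx, List.getD_eq_getElem _ _ (by simp [List.length_set]; omega), List.getElem_set]
    by_cases hqy : q.toNat = y
    · rw [if_pos hqy, if_pos ⟨by omega, by omega⟩]
    · rw [if_neg hqy, if_neg (by omega), hAg, List.getD_eq_getElem _ _ (by omega)]
  · rw [if_neg hpx, if_neg (by omega), hAg]

-- effect of the direction fold of pvMark on one cell
theorem pvGG_dirfold {Rn Cn : Nat} {R C i j : Int} (hR : R.toNat = Rn) (hC : C.toNat = Cn)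
    {x y : Nat} (hx : x < Rn) (hy : y < Cn) (ds : List (Int × Int)) :
    ∀ g, pvShape g Rn Cn →
      pvGG (ds.foldl (fun g d =>
        if 0 ≤ i + d.1 ∧ i + d.1 < R ∧ 0 ≤ j + d.2 ∧ j + d.2 < C then
          pvSet2 g (i + d.1) (j + d.2) "."
        else g) g) x y
      = if pvNear i j x y ds then "." else pvGG g x y := by
  induction ds with
  | nil => intro g h; simp [pvNear]
  | cons d rest ih =>
    intro g h
    simp only [List.foldl_cons]
    have hcons : ∀ b : Bool,
        pvNear i j x y (d :: rest)
        = ((decide ((x : Int) = i + d.1) && decide ((y : Int) = j + d.2)) || pvNear i j x y rest) := by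
      intro _; simp [pvNear]
    by_cases hg : 0 ≤ i + d.1 ∧ i + d.1 < R ∧ 0 ≤ j + d.2 ∧ j + d.2 < C
    · rw [if_pos hg, ih _ (pvShape_set2 h _ _ _)]
      by_cases hrest : pvNear i j x y rest = true
      · rw [if_pos hrest, if_pos (by simp [pvNear, List.any_cons] at hrest ⊢; exact Or.inr hrest)]
      · rw [if_neg hrest, pvGG_set2 h hg.1 hg.2.2.1 hx hy]
        by_cases hd : (x : Int) = i + d.1 ∧ (y : Int) = j + d.2
        · rw [if_pos hd, if_pos (by simp [pvNear, List.any_cons]; exact Or.inl ⟨hd.1, hd.2⟩)]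
        · rw [if_neg hd, if_neg (by
            simp only [pvNear, List.any_cons, Bool.or_eq_true, Bool.and_eq_true,
              decide_eq_true_eq]
            rintro (⟨e1, e2⟩ | hr)
            · exact hd ⟨e1, e2⟩
            · exact hrest (by simpa [pvNear] using hr))]
    · rw [if_neg hg, ih _ h]
      have hnd : ¬((x : Int) = i + d.1 ∧ (y : Int) = j + d.2) := by
        rintro ⟨e1, e2⟩; exact hg ⟨by omega, by omega, by omega, by omega⟩
      by_cases hrest : pvNear i j x y rest = true
      · rw [if_pos hrest, if_pos (by simp [pvNear, List.any_cons] at hrest ⊢; exact Or.inr hrest)]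
      · rw [if_neg hrest, if_neg (by
          simp only [pvNear, List.any_cons, Bool.or_eq_true, Bool.and_eq_true,
            decide_eq_true_eq]
          rintro (⟨e1, e2⟩ | hr)
          · exact hnd ⟨e1, e2⟩
          · exact hrest (by simpa [pvNear] using hr))]

theorem pvShape_mark {g : List (List String)} {Rn Cn : Nat} (h : pvShape g Rn Cn)
    (location : List (List String)) (R C i j : Int) :
    pvShape (pvMark location R C g i j) Rn Cn := by
  rw [pvMark]
  split
  · have base : pvShape (pvSet2 g i j ".") Rn Cn := pvShape_set2 h _ _ _
    generalize pvSet2 g i j "." = g0 at base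
    clear h
    induction pvDirs generalizing g0 with
    | nil => exact base
    | cons d rest ih =>
      simp only [List.foldl_cons]
      apply ih
      split
      · exact pvShape_set2 base _ _ _
      · exact base
  · exact h

theorem pvGG_mark {g : List (List String)} {Rn Cn : Nat} (h : pvShape g Rn Cn)
    (location : List (List String)) {R C i j : Int}
    (hR : R.toNat = Rn) (hC : C.toNat = Cn) (hi : 0 ≤ i) (hj : 0 ≤ j)
    {x y : Nat} (hx : x < Rn) (hy : y < Cn) :
    pvGG (pvMark location R C g i j) x y
    = if pvMarkHit location i j x y then "." else pvGG g x y := by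
  rw [pvMark]
  by_cases hb : pvCell location i j = "O"
  · rw [if_pos hb, pvGG_dirfold hR hC hx hy _ _ (pvShape_set2 h _ _ _),
      pvGG_set2 h hi hj hx hy]
    by_cases hn : pvNear i j x y pvDirs = true
    · rw [if_pos hn, if_pos (by simp [pvMarkHit, pvAdjB, hb, hn])]
    · rw [if_neg hn]
      by_cases hc : (x : Int) = i ∧ (y : Int) = j
      · rw [if_pos hc, if_pos (by simp [pvMarkHit, pvAdjB, hb, hc.1, hc.2])]
      · rw [if_neg hc, if_neg (by
          simp only [pvMarkHit, pvAdjB, Bool.and_eq_true, Bool.or_eq_true,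
            decide_eq_true_eq]
          rintro ⟨-, ⟨e1, e2⟩ | hn'⟩
          · exact hc ⟨e1, e2⟩
          · exact hn hn')]
  · rw [if_neg hb, if_neg (by simp [pvMarkHit, hb])]

-- inner loop over a list of column indices
theorem pvGG_inner {Rn Cn : Nat} (location : List (List String)) {R C i : Int}
    (hR : R.toNat = Rn) (hC : C.toNat = Cn) (hi : 0 ≤ i)
    {x y : Nat} (hx : x < Rn) (hy : y < Cn) (js : List Int) (hjs : ∀ j ∈ js, 0 ≤ j) :
    ∀ g, pvShape g Rn Cn →
      pvGG (js.foldl (fun g j => pvMark location R C g i j) g) x y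
      = if js.any (fun j => pvMarkHit location i j x y) then "." else pvGG g x y := by
  induction js with
  | nil => intro g h; simp
  | cons j rest ih =>
    intro g h
    simp only [List.foldl_cons]
    rw [ih (fun a ha => hjs a (by simp [ha])) _ (pvShape_mark h location R C i j)]
    by_cases hrest : rest.any (fun a => pvMarkHit location i a x y) = true
    · rw [if_pos hrest, if_pos (by simp [List.any_cons, hrest])]
    · rw [if_neg hrest, pvGG_mark h location hR hC hi (hjs j (by simp)) hx hy]
      by_cases hj : pvMarkHit location i j x y = true
      · rw [if_pos hj, if_pos (by simp [List.any_cons, hj])]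
      · rw [if_neg hj, if_neg (by simp [List.any_cons, hj, hrest])]

theorem pvShape_inner {Rn Cn : Nat} (location : List (List String)) (R C i : Int)
    (js : List Int) : ∀ g, pvShape g Rn Cn →
      pvShape (js.foldl (fun g j => pvMark location R C g i j) g) Rn Cn := by
  induction js with
  | nil => intro g h; exact h
  | cons j rest ih => intro g h; exact ih _ (pvShape_mark h location R C i j)

-- outer loop over a list of row indices
theorem pvGG_outer {Rn Cn : Nat} (location : List (List String)) {R C : Int}
    (hR : R.toNat = Rn) (hC : C.toNat = Cn)
    {x y : Nat} (hx : x < Rn) (hy : y < Cn) (is : List Int) (his : ∀ i ∈ is, 0 ≤ i) :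
    ∀ g, pvShape g Rn Cn →
      pvGG (is.foldl (fun g i =>
        (PySem.List.pyRange 0 C 1).foldl (fun g j => pvMark location R C g i j) g) g) x y
      = if is.any (fun i => (PySem.List.pyRange 0 C 1).any fun j => pvMarkHit location i j x y)
        then "." else pvGG g x y := by
  induction is with
  | nil => intro g h; simp
  | cons i rest ih =>
    intro g h
    simp only [List.foldl_cons]
    rw [ih (fun a ha => his a (by simp [ha])) _ (pvShape_inner location R C i _ _ h)]
    by_cases hrest :
        rest.any (fun a => (PySem.List.pyRange 0 C 1).any fun j => pvMarkHit location a j x y) = true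
    · rw [if_pos hrest, if_pos (by simp [List.any_cons, hrest])]
    · rw [if_neg hrest,
        pvGG_inner location hR hC (his i (by simp)) hx hy _
          (fun j hj => (PySem.List.mem_pyRange_one.mp hj).1) _ h]
      by_cases hme : ((PySem.List.pyRange 0 C 1).any fun j => pvMarkHit location i j x y) = true
      · rw [if_pos hme, if_pos (by simp [List.any_cons, hme])]
      · rw [if_neg hme, if_neg (by simp [List.any_cons, hme, hrest])]

-- explicit form of the scatter condition at an in-range cell
theorem pvHit_iff (location : List (List String)) {R C : Int} {x y : Nat}
    (hx : (x : Int) < R) (hy : (y : Int) < C) :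
    pvHitB location R C x y = true ↔
      pvCell location x y = "O"
      ∨ ((y : Int) + 1 < C ∧ pvCell location x ((y : Int) + 1) = "O")
      ∨ (0 ≤ (y : Int) - 1 ∧ pvCell location x ((y : Int) - 1) = "O")
      ∨ ((x : Int) + 1 < R ∧ pvCell location ((x : Int) + 1) y = "O")
      ∨ (0 ≤ (x : Int) - 1 ∧ pvCell location ((x : Int) - 1) y = "O") := by
  simp only [pvHitB, pvMarkHit, pvAdjB, pvNear, List.any_eq_true, Bool.and_eq_true,
    Bool.or_eq_true, decide_eq_true_eq, PySem.List.mem_pyRange_one]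
  constructor
  · rintro ⟨i, ⟨hi0, hiR⟩, j, ⟨hj0, hjC⟩, hb, ⟨e1, e2⟩ | ⟨d, hd, e1, e2⟩⟩
    · rw [← e1, ← e2] at hb; exact Or.inl hb
    · simp only [pvDirs, List.mem_cons, List.not_mem_nil, or_false] at hd
      rcases hd with rfl | rfl | rfl | rfl
      · simp only at e1 e2
        rw [show i = ((x : Int)) by omega, show j = (y : Int) - 1 by omega] at hb
        exact Or.inr (Or.inr (Or.inl ⟨by omega, hb⟩))
      · simp only at e1 e2
        rw [show i = ((x : Int)) by omega, show j = (y : Int) + 1 by omega] at hb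
        exact Or.inr (Or.inl ⟨by omega, hb⟩)
      · simp only at e1 e2
        rw [show i = (x : Int) - 1 by omega, show j = ((y : Int)) by omega] at hb
        exact Or.inr (Or.inr (Or.inr (Or.inr ⟨by omega, hb⟩)))
      · simp only at e1 e2
        rw [show i = (x : Int) + 1 by omega, show j = ((y : Int)) by omega] at hb
        exact Or.inr (Or.inr (Or.inr (Or.inl ⟨by omega, hb⟩)))
  · rintro (hb | ⟨hc, hb⟩ | ⟨hc, hb⟩ | ⟨hc, hb⟩ | ⟨hc, hb⟩)
    · exact ⟨x, ⟨by omega, hx⟩, y, ⟨by omega, hy⟩, hb, Or.inl ⟨rfl, rfl⟩⟩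
    · exact ⟨x, ⟨by omega, hx⟩, (y : Int) + 1, ⟨by omega, hc⟩, hb,
        Or.inr ⟨(0, -1), by simp [pvDirs], by omega, by omega⟩⟩
    · exact ⟨x, ⟨by omega, hx⟩, (y : Int) - 1, ⟨hc, by omega⟩, hb,
        Or.inr ⟨(0, 1), by simp [pvDirs], by omega, by omega⟩⟩
    · exact ⟨(x : Int) + 1, ⟨by omega, hc⟩, y, ⟨by omega, hy⟩, hb,
        Or.inr ⟨(-1, 0), by simp [pvDirs], by omega, by omega⟩⟩
    · exact ⟨(x : Int) - 1, ⟨hc, by omega⟩, y, ⟨by omega, hy⟩, hb,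
        Or.inr ⟨(1, 0), by simp [pvDirs], by omega, by omega⟩⟩

-- the gather condition of B, in the same explicit form
theorem pvBoom_iff (location : List (List String)) {R C : Int} (x y : Nat)
    (hx : (x : Int) < R) (hy : (y : Int) < C) :
    pvBoom location R C x y = true ↔
      pvCell location x y = "O"
      ∨ ((y : Int) + 1 < C ∧ pvCell location x ((y : Int) + 1) = "O")
      ∨ (0 ≤ (y : Int) - 1 ∧ pvCell location x ((y : Int) - 1) = "O")
      ∨ ((x : Int) + 1 < R ∧ pvCell location ((x : Int) + 1) y = "O")
      ∨ (0 ≤ (x : Int) - 1 ∧ pvCell location ((x : Int) - 1) y = "O") := by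
  rw [pvBoom]
  by_cases hb : pvCell location x y = "O"
  · rw [if_pos hb]
    exact ⟨fun _ => Or.inl hb, fun _ => rfl⟩
  · rw [if_neg hb]
    simp only [pvDirs, List.any_cons, List.any_nil, Bool.or_false, Bool.or_eq_true,
      Bool.and_eq_true, decide_eq_true_eq]
    constructor
    · rintro (⟨⟨⟨⟨h1, h2⟩, h3⟩, h4⟩, h5⟩ | ⟨⟨⟨⟨h1, h2⟩, h3⟩, h4⟩, h5⟩ |
        ⟨⟨⟨⟨h1, h2⟩, h3⟩, h4⟩, h5⟩ | ⟨⟨⟨⟨h1, h2⟩, h3⟩, h4⟩, h5⟩)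
      · exact Or.inr (Or.inl ⟨h4, h5⟩)
      · exact Or.inr (Or.inr (Or.inl ⟨by omega, by
          rwa [show (y : Int) + -1 = (y : Int) - 1 by omega] at h5⟩))
      · exact Or.inr (Or.inr (Or.inr (Or.inl ⟨h2, by
          rwa [show (y : Int) + 0 = (y : Int) by omega] at h5⟩)))
      · exact Or.inr (Or.inr (Or.inr (Or.inr ⟨by omega, by
          rwa [show (x : Int) + -1 = (x : Int) - 1 by omega,
            show (y : Int) + 0 = (y : Int) by omega] at h5⟩)))
    · rintro (hb' | ⟨hc, hb'⟩ | ⟨hc, hb'⟩ | ⟨hc, hb'⟩ | ⟨hc, hb'⟩)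
      · exact absurd hb' hb
      · exact Or.inl ⟨⟨⟨⟨by omega, by omega⟩, by omega⟩, hc⟩, hb'⟩
      · exact Or.inr (Or.inl ⟨⟨⟨⟨by omega, by omega⟩, by omega⟩, by omega⟩, by
          rwa [show (y : Int) + -1 = (y : Int) - 1 by omega]⟩)
      · exact Or.inr (Or.inr (Or.inl ⟨⟨⟨⟨by omega, hc⟩, by omega⟩, by omega⟩, by
          rwa [show (y : Int) + 0 = (y : Int) by omega]⟩))
      · exact Or.inr (Or.inr (Or.inr ⟨⟨⟨⟨by omega, by omega⟩, by omega⟩, by omega⟩, by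
          rwa [show (x : Int) + -1 = (x : Int) - 1 by omega,
            show (y : Int) + 0 = (y : Int) by omega]⟩))

theorem pvShape_init (R C : Int) :
    pvShape ((PySem.List.pyRange 0 R 1).map fun _ => (PySem.List.pyRange 0 C 1).map fun _ => "O")
      R.toNat C.toNat := by
  constructor
  · simp [PySem.List.length_pyRange_one]
  · intro k _
    simp [PySem.List.length_pyRange_one]

theorem pvGG_init (R C : Int) {x y : Nat} (hx : x < R.toNat) (hy : y < C.toNat) :
    pvGG ((PySem.List.pyRange 0 R 1).map fun _ => (PySem.List.pyRange 0 C 1).map fun _ => "O")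
      x y = "O" := by
  have hx' : x < ((PySem.List.pyRange 0 R 1).map
      fun _ => (PySem.List.pyRange 0 C 1).map fun _ => "O").length := by
    simp [PySem.List.length_pyRange_one]; omega
  rw [pvGG, List.getD_eq_getElem _ _ hx', List.getElem_map]
  rw [List.getD_eq_getElem _ _ (by simp [PySem.List.length_pyRange_one]; omega),
    List.getElem_map]

theorem pvGG_A (location : List (List String)) (R C : Int) {x y : Nat}
    (hx : x < R.toNat) (hy : y < C.toNat) :
    pvGG (bombed_ location R C) x y = if pvHitB location R C x y then "." else "O" := by
  rw [bombed_, pvGG_outer location rfl rfl hx hy _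
    (fun i hi => (PySem.List.mem_pyRange_one.mp hi).1) _ (pvShape_init R C),
    pvGG_init R C hx hy, pvHitB]

theorem pvShape_A (location : List (List String)) (R C : Int) :
    pvShape (bombed_ location R C) R.toNat C.toNat := by
  rw [bombed_]
  generalize hg : ((PySem.List.pyRange 0 R 1).map
    fun _ => (PySem.List.pyRange 0 C 1).map fun _ => "O") = g0
  have h0 : pvShape g0 R.toNat C.toNat := hg ▸ pvShape_init R C
  clear hg
  induction PySem.List.pyRange 0 R 1 generalizing g0 with
  | nil => exact h0
  | cons i rest ih => exact ih _ (pvShape_inner location R C i _ _ h0)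

theorem pvGG_eq_getElem {g : List (List String)} {Rn Cn : Nat} (h : pvShape g Rn Cn)
    {x y : Nat} (hx : x < g.length) (hy : y < (g[x]'hx).length) :
    (g[x]'hx)[y]'hy = pvGG g x y := by
  rw [pvGG, List.getD_eq_getElem _ _ hx, List.getD_eq_getElem _ _ hy]

-- ===== VERDICT (by name: the statement is the Claim_ definition above) =====
theorem bombed__spec : Claim_equal_bombed_ := by
  intro location R C hdom hpre
  unfold Spec_bombed_
  by_cases hR0 : R ≤ 0
  · rw [bombed_, bombed__alt, PySem.List.pyRange_one_eq_nil hR0]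
    simp
  by_cases hC0 : C ≤ 0
  · rw [bombed_, bombed__alt, PySem.List.pyRange_one_eq_nil hC0]
    simp only [List.foldl_nil, List.map_nil]
    rw [pvFoldlId]
  rw [not_le] at hR0 hC0
  have hA := pvShape_A location R C
  have hBlen : (bombed__alt location R C).length = R.toNat := by
    simp [bombed__alt, PySem.List.length_pyRange_one]
  apply List.ext_getElem (by rw [hA.1, hBlen])
  intro k h1 h2
  have hk : k < R.toNat := by omega
  have hrowA : ((bombed_ location R C)[k]'h1).length = C.toNat := hA.2 k h1
  have hBrow : (bombed__alt location R C)[k]'h2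
      = (PySem.List.pyRange 0 C 1).map fun j =>
          if pvBoom location R C (0 + (k : Int)) j then "." else "O" := by
    simp only [bombed__alt]
    rw [List.getElem_map, PySem.List.getElem_pyRange_one]
  apply List.ext_getElem (by rw [hrowA, hBrow]; simp [PySem.List.length_pyRange_one])
  intro l h3 h4
  have hl : l < C.toNat := by omega
  have hBcell : ((bombed__alt location R C)[k]'h2)[l]'h4
      = if pvBoom location R C (k : Int) (l : Int) then "." else "O" := by
    simp only [hBrow]
    rw [List.getElem_map, PySem.List.getElem_pyRange_one]
    norm_num
  rw [pvGG_eq_getElem hA h1 h3, pvGG_A location R C hk hl, hBcell]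
  have hxR : ((k : Int)) < R := by omega
  have hyC : ((l : Int)) < C := by omega
  by_cases hhit : pvHitB location R C k l = true
  · rw [if_pos hhit, if_pos ((pvBoom_iff location k l hxR hyC).mpr
      ((pvHit_iff location hxR hyC).mp hhit))]
  · rw [if_neg hhit, if_neg (by
      intro hbm
      exact hhit ((pvHit_iff location hxR hyC).mpr ((pvBoom_iff location k l hxR hyC).mp hbm)))]
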